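-- pv_equiv track=rewrite | github.com/sriniraghunathan/lensing_sys_fisher | tools_for_plotting.py | get_sbpl_locs_dic
-- ===== SOURCE A (Python) =====
-- def get_sbpl_locs_dic(param_names_to_plot, cosmo_param_pl_chars_dict, offset = 0, show_diagonal = True):
--     if show_diagonal:
--         totparamstoplot = len(param_names_to_plot)
--         sbpl_locs_dic = {}
--         for p1 in param_names_to_plot:
--             for p2 in param_names_to_plot:
--                 sbpl_locs_dic[(p1,p2)] = cosmo_param_pl_chars_dict[p1][0] + ((cosmo_param_pl_chars_dict[p2][0]-1 + offset) * totparamstoplot)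
--     else:
--         totparamstoplot = len(param_names_to_plot)
--         sbpl_locs_dic = {}
--         sbpl = 1
--         for p1 in param_names_to_plot:
--             for p2 in param_names_to_plot:
--                 if p1 == p2 or (p2,p1) in sbpl_locs_dic: continue
--                 sbpl_locs_dic[(p1,p2)] = sbpl_locs_dic[(p2,p1)] = sbpl
--                 sbpl += 1
--     return sbpl_locs_dic
-- ===== SOURCE B (Python) =====
-- def _pairs(xs):
--     if not xs:
--         return []
--     return [(xs[0], y) for y in xs[1:]] + _pairs(xs[1:])
--
-- def get_sbpl_locs_dic(param_names_to_plot, cosmo_param_pl_chars_dict, offset = 0, show_diagonal = True):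
--     if show_diagonal:
--         n = len(param_names_to_plot)
--         return {(p1, p2): cosmo_param_pl_chars_dict[p1][0] + (cosmo_param_pl_chars_dict[p2][0] - 1 + offset) * n
--                 for p1 in param_names_to_plot for p2 in param_names_to_plot}
--     uniq = list(dict.fromkeys(param_names_to_plot))
--     sbpl_locs_dic = {}
--     for sbpl, (p1, p2) in enumerate(_pairs(uniq), 1):
--         sbpl_locs_dic[(p1, p2)] = sbpl
--         sbpl_locs_dic[(p2, p1)] = sbpl
--     return sbpl_locs_dic
-- ===== Notes on version B (the rewrite author's own statement) =====
-- stated objective: idiomatic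
-- what changed: The diagonal branch becomes a single dict comprehension over ordered pairs; the non-diagonal branch replaces the n*n loop with mutable skip logic (p1==p2 / reverse-pair membership test) by deduplicating the names once and enumerating a materialized list of unique upper-triangle pairs, assigning each index to the pair and its reverse.
import Mathlib
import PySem

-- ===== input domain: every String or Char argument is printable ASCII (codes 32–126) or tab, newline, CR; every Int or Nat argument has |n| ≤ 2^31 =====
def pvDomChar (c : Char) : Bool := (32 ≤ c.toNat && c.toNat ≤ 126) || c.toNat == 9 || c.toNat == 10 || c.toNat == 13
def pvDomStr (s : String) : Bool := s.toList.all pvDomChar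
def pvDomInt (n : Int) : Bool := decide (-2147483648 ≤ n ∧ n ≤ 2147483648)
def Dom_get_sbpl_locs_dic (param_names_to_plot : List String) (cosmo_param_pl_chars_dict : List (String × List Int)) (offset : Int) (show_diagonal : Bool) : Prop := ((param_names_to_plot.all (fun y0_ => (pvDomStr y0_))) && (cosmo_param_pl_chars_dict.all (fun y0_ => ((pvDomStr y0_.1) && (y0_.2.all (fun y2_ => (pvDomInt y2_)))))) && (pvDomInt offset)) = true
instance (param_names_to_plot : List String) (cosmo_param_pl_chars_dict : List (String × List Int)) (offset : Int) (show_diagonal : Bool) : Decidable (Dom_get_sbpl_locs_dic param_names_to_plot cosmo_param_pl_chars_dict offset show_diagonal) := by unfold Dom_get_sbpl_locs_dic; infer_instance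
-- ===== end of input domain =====

-- B replaces the diagonal branch by a dict comprehension over ordered pairs and the non-diagonal
-- branch's mutable skip logic by deduplication plus an enumerated list of unique pairs (objective: idiomatic).

-- ===== PORT A =====
def get_sbpl_locs_dic (param_names_to_plot : List String) (cosmo_param_pl_chars_dict : List (String × List Int)) (offset : Int) (show_diagonal : Bool) : List (String × String × Int) :=
  if show_diagonal then
    let totparamstoplot : Int := PySem.List.len param_names_to_plot
    -- cosmo_param_pl_chars_dict[p][0]: total surrogate (getD/pyGetD); exact under Pre_ (key present, value nonempty)
    let d : PySem.Dict (String × String) Int :=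
      param_names_to_plot.foldl (fun d p1 =>
        param_names_to_plot.foldl (fun d p2 =>
          d.insert (p1, p2)
            (PySem.List.pyGetD ((PySem.Dict.mk cosmo_param_pl_chars_dict).getD p1 []) 0 0 +
              (PySem.List.pyGetD ((PySem.Dict.mk cosmo_param_pl_chars_dict).getD p2 []) 0 0 - 1 + offset) * totparamstoplot)) d)
        PySem.Dict.empty
    d.items.map (fun kv => (kv.1.1, kv.1.2, kv.2))
  else
    let st : PySem.Dict (String × String) Int × Int :=
      param_names_to_plot.foldl (fun st p1 =>
        param_names_to_plot.foldl (fun st p2 =>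
          if p1 == p2 || st.1.contains (p2, p1) then st
          else ((st.1.insert (p1, p2) st.2).insert (p2, p1) st.2, st.2 + 1)) st)
        (PySem.Dict.empty, 1)
    st.1.items.map (fun kv => (kv.1.1, kv.1.2, kv.2))

-- ===== PORT B =====
-- _pairs(xs): all upper-triangle pairs, recursively
def pvPairs : List String → List (String × String)
  | [] => []
  | x :: xs => xs.map (fun y => (x, y)) ++ pvPairs xs

def get_sbpl_locs_dic_alt (param_names_to_plot : List String) (cosmo_param_pl_chars_dict : List (String × List Int)) (offset : Int) (show_diagonal : Bool) : List (String × String × Int) :=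
  if show_diagonal then
    let n : Int := PySem.List.len param_names_to_plot
    -- dict comprehension = fold of inserts over the comprehension's iteration order
    let d : PySem.Dict (String × String) Int :=
      (param_names_to_plot.flatMap (fun p1 => param_names_to_plot.map (fun p2 => (p1, p2)))).foldl
        (fun d pr => d.insert pr
          (PySem.List.pyGetD ((PySem.Dict.mk cosmo_param_pl_chars_dict).getD pr.1 []) 0 0 +
            (PySem.List.pyGetD ((PySem.Dict.mk cosmo_param_pl_chars_dict).getD pr.2 []) 0 0 - 1 + offset) * n))
        PySem.Dict.empty
    d.items.map (fun kv => (kv.1.1, kv.1.2, kv.2))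
  else
    let uniq := PySem.List.dedup param_names_to_plot   -- list(dict.fromkeys(...))
    let d : PySem.Dict (String × String) Int :=
      (PySem.List.enumerate (pvPairs uniq) 1).foldl
        (fun d ip => (d.insert ip.2 ip.1).insert (ip.2.2, ip.2.1) ip.1)
        PySem.Dict.empty
    d.items.map (fun kv => (kv.1.1, kv.1.2, kv.2))

-- ===== PRECONDITION & SPEC =====
-- Pre_ excludes exactly the inputs where Python A raises: with show_diagonal, a plotted name
-- missing from cosmo_param_pl_chars_dict (KeyError) or mapped to an empty list (IndexError).
def Pre_get_sbpl_locs_dic (param_names_to_plot : List String) (cosmo_param_pl_chars_dict : List (String × List Int)) (offset : Int) (show_diagonal : Bool) : Prop :=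
  show_diagonal = true → ∀ p ∈ param_names_to_plot, (PySem.Dict.mk cosmo_param_pl_chars_dict).getD p [] ≠ []
instance (param_names_to_plot : List String) (cosmo_param_pl_chars_dict : List (String × List Int)) (offset : Int) (show_diagonal : Bool) : Decidable (Pre_get_sbpl_locs_dic param_names_to_plot cosmo_param_pl_chars_dict offset show_diagonal) := by unfold Pre_get_sbpl_locs_dic; infer_instance
def pvWitness_get_sbpl_locs_dic : List String × (List (String × List Int)) × Int × Bool := (["a", "b"], [("a", [1]), ("b", [2])], 0, true)
def Spec_get_sbpl_locs_dic (param_names_to_plot : List String) (cosmo_param_pl_chars_dict : List (String × List Int)) (offset : Int) (show_diagonal : Bool) (out : List (String × String × Int)) : Prop := out = get_sbpl_locs_dic_alt param_names_to_plot cosmo_param_pl_chars_dict offset show_diagonal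
instance (param_names_to_plot : List String) (cosmo_param_pl_chars_dict : List (String × List Int)) (offset : Int) (show_diagonal : Bool) (out : List (String × String × Int)) : Decidable (Spec_get_sbpl_locs_dic param_names_to_plot cosmo_param_pl_chars_dict offset show_diagonal out) := by unfold Spec_get_sbpl_locs_dic; infer_instance

-- ===== CLAIM (what is proved, stated in full; the proofs are below) =====
def Claim_equal_get_sbpl_locs_dic : Prop := ∀ (param_names_to_plot : List String) (cosmo_param_pl_chars_dict : List (String × List Int)) (offset : Int) (show_diagonal : Bool), Dom_get_sbpl_locs_dic param_names_to_plot cosmo_param_pl_chars_dict offset show_diagonal → Pre_get_sbpl_locs_dic param_names_to_plot cosmo_param_pl_chars_dict offset show_diagonal → Spec_get_sbpl_locs_dic param_names_to_plot cosmo_param_pl_chars_dict offset show_diagonal (get_sbpl_locs_dic param_names_to_plot cosmo_param_pl_chars_dict offset show_diagonal)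

-- ===== LEMMAS AND PROOFS =====

-- combined "insert both orientations, bump the counter" step
def pvInsertBoth (st : PySem.Dict (String × String) Int × Int) (pr : String × String) : PySem.Dict (String × String) Int × Int :=
  ((st.1.insert pr st.2).insert (pr.2, pr.1) st.2, st.2 + 1)

-- ordered dedup of l, skipping everything in (the growing) avoid set
def pvSift (avoid : List String) : List String → List String
  | [] => []
  | x :: xs => if x ∈ avoid then pvSift avoid xs else x :: pvSift (x :: avoid) xs

theorem pvSift_cons_mem {x : String} {A : List String} (xs : List String) (h : x ∈ A) : pvSift A (x :: xs) = pvSift A xs := by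
  rw [pvSift, if_pos h]

theorem pvSift_cons_not_mem {x : String} {A : List String} (xs : List String) (h : x ∉ A) : pvSift A (x :: xs) = x :: pvSift (x :: A) xs := by
  rw [pvSift, if_neg h]

theorem mem_pvSift (y : String) : ∀ (l A : List String), y ∈ pvSift A l ↔ y ∈ l ∧ y ∉ A := by
  intro l
  induction l with
  | nil => intro A; simp [pvSift]
  | cons x xs ih =>
    intro A
    by_cases h : x ∈ A
    · rw [pvSift_cons_mem xs h]
      simp only [ih, List.mem_cons]
      constructor
      · tauto
      · rintro ⟨rfl | h1, h2⟩
        · exact absurd h h2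
        · exact ⟨h1, h2⟩
    · rw [pvSift_cons_not_mem xs h]
      simp only [List.mem_cons, ih]
      by_cases hyx : y = x
      · subst hyx; tauto
      · simp [hyx]

theorem pvSift_congr : ∀ (l A B : List String), (∀ y, y ∈ A ↔ y ∈ B) → pvSift A l = pvSift B l := by
  intro l
  induction l with
  | nil => intro A B _; rfl
  | cons x xs ih =>
    intro A B h
    by_cases hx : x ∈ A
    · rw [pvSift_cons_mem xs hx, pvSift_cons_mem xs ((h x).1 hx)]
      exact ih A B h
    · rw [pvSift_cons_not_mem xs hx, pvSift_cons_not_mem xs (fun hb => hx ((h x).2 hb))]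
      exact congrArg (x :: ·) (ih (x :: A) (x :: B) (by intro y; simp [h y]))

theorem pvSift_cons_avoid (x : String) : ∀ (l A : List String), pvSift (x :: A) l = (pvSift A l).filter (fun y => y != x) := by
  intro l
  induction l with
  | nil => intro A; rfl
  | cons p xs ih =>
    intro A
    by_cases hpA : p ∈ A
    · rw [pvSift_cons_mem xs (List.mem_cons_of_mem _ hpA), pvSift_cons_mem xs hpA, ih]
    · by_cases hpx : p = x
      · subst hpx
        rw [pvSift_cons_mem xs (List.mem_cons_self), pvSift_cons_not_mem xs hpA, List.filter_cons]
        simp only [bne_self_eq_false, Bool.false_eq_true, if_false]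
        have hall : ∀ a ∈ pvSift (p :: A) xs, (a != p) = true := by
          intro a ha
          have := (mem_pvSift a xs (p :: A)).1 ha
          simp only [bne_iff_ne, ne_eq]
          intro h; exact this.2 (h ▸ List.mem_cons_self)
        rw [List.filter_eq_self.2 hall]
      · rw [pvSift_cons_not_mem xs (by simp [hpx, hpA]), pvSift_cons_not_mem xs hpA, List.filter_cons]
        simp only [show (p != x) = true by simp [hpx], if_pos]
        refine congrArg (p :: ·) ?_
        rw [pvSift_congr xs (p :: x :: A) (x :: p :: A) (by intro y; simp; tauto), ih (p :: A)]

theorem pvDedup_eq_pvSift : ∀ l : List String, PySem.List.dedup l = pvSift [] l := by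
  intro l
  induction l with
  | nil => rfl
  | cons x xs ih =>
    rw [show PySem.List.dedup (x :: xs) = PySem.Set.ofList (x :: xs) from by simp [pysem],
        PySem.Set.ofList_cons]
    rw [pvSift_cons_not_mem xs (List.not_mem_nil), pvSift_cons_avoid, ← ih]
    rw [show PySem.Set.ofList xs = PySem.List.dedup xs from by simp [pysem]]
    rfl

theorem contains_pvFold : ∀ (ps : List (String × String)) (d : PySem.Dict (String × String) Int) (k : Int) (key : String × String),
    ((ps.foldl pvInsertBoth (d, k)).1.contains key = true) ↔
      (d.contains key = true ∨ ∃ pr ∈ ps, key = pr ∨ key = (pr.2, pr.1)) := by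
  intro ps
  induction ps with
  | nil => intro d k key; simp
  | cons pr rest ih =>
    intro d k key
    rw [List.foldl_cons, show pvInsertBoth (d, k) pr = ((d.insert pr k).insert (pr.2, pr.1) k, k + 1) from rfl, ih]
    rw [PySem.Dict.contains_insert, PySem.Dict.contains_insert]
    simp only [Bool.or_eq_true, beq_iff_eq, List.mem_cons]
    constructor
    · rintro ((h | h | h) | ⟨q, hq, h⟩)
      · exact Or.inr ⟨pr, Or.inl rfl, Or.inr h⟩
      · exact Or.inr ⟨pr, Or.inl rfl, Or.inl h⟩
      · exact Or.inl h
      · exact Or.inr ⟨q, Or.inr hq, h⟩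
    · rintro (h | ⟨q, (rfl | hq), h⟩)
      · exact Or.inl (Or.inr (Or.inr h))
      · rcases h with h | h
        · exact Or.inl (Or.inr (Or.inl h))
        · exact Or.inl (Or.inl h)
      · exact Or.inr ⟨q, hq, h⟩

theorem pvInner (p1 : String) : ∀ (E A : List String) (d : PySem.Dict (String × String) Int) (k : Int),
    p1 ∉ A → (∀ q ∈ E, (d.contains (q, p1) = true ↔ q ∈ A)) →
    E.foldl (fun st p2 =>
        if p1 == p2 || st.1.contains (p2, p1) then st
        else ((st.1.insert (p1, p2) st.2).insert (p2, p1) st.2, st.2 + 1)) (d, k)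
      = ((pvSift (p1 :: A) E).map (fun q => (p1, q))).foldl pvInsertBoth (d, k) := by
  intro E
  induction E with
  | nil => intro A d k _ _; rfl
  | cons p2 rest ih =>
    intro A d k hp1 hc
    by_cases h21 : p2 = p1
    · subst h21
      rw [List.foldl_cons, if_pos (by simp), pvSift_cons_mem rest List.mem_cons_self]
      exact ih A d k hp1 (fun q hq => hc q (List.mem_cons_of_mem _ hq))
    · by_cases h2A : p2 ∈ A
      · rw [List.foldl_cons, if_pos (by
            rw [Bool.or_eq_true]
            exact Or.inr ((hc p2 List.mem_cons_self).2 h2A)),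
          pvSift_cons_mem rest (List.mem_cons_of_mem _ h2A)]
        exact ih A d k hp1 (fun q hq => hc q (List.mem_cons_of_mem _ hq))
      · have hcontains : d.contains (p2, p1) = false := by
          rw [← Bool.not_eq_true]
          intro h
          exact h2A ((hc p2 List.mem_cons_self).1 h)
        rw [List.foldl_cons, if_neg (by
            simp only [Bool.or_eq_true, beq_iff_eq, hcontains, Bool.false_eq_true, or_false]
            exact fun h => h21 h.symm)]
        rw [pvSift_cons_not_mem rest (by simp [h21, h2A])]
        rw [List.map_cons, List.foldl_cons]
        rw [ih (p2 :: A) _ _ (by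
              intro h
              rcases List.mem_cons.1 h with h' | h'
              · exact h21 h'.symm
              · exact hp1 h') ?_]
        · rw [pvSift_congr rest (p1 :: p2 :: A) (p2 :: p1 :: A) (by intro y; simp; tauto)]
          rfl
        · intro q hq
          have hq' := hc q (List.mem_cons_of_mem _ hq)
          rw [PySem.Dict.contains_insert, PySem.Dict.contains_insert]
          simp only [Bool.or_eq_true, beq_iff_eq, Prod.mk.injEq, List.mem_cons, and_true]
          rw [hq']
          constructor
          · rintro (rfl | ⟨rfl, h⟩ | h)
            · exact Or.inl rfl
            · exact absurd h.symm h21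
            · exact Or.inr h
          · rintro (rfl | h)
            · exact Or.inl rfl
            · exact Or.inr (Or.inr h)

theorem pvOuter (E : List String) : ∀ (t S : List String) (d : PySem.Dict (String × String) Int) (k : Int),
    (∀ x ∈ t, x ∈ E) → pvSift S E = pvSift S t →
    (∀ x y, x ∈ E → y ∈ E → (d.contains (x, y) = true ↔ x ≠ y ∧ (x ∈ S ∨ y ∈ S))) →
    t.foldl (fun st p1 =>
        E.foldl (fun st p2 =>
          if p1 == p2 || st.1.contains (p2, p1) then st
          else ((st.1.insert (p1, p2) st.2).insert (p2, p1) st.2, st.2 + 1)) st) (d, k)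
      = (pvPairs (pvSift S t)).foldl pvInsertBoth (d, k) := by
  intro t
  induction t with
  | nil => intro S d k _ _ _; rfl
  | cons p1 t' ih =>
    intro S d k hsub hE hinv
    have hp1E : p1 ∈ E := hsub p1 List.mem_cons_self
    by_cases hp1S : p1 ∈ S
    · -- the inner loop is a no-op: every pair (q, p1) is already present or q = p1
      have hfix : ∀ (l : List String), (∀ x ∈ l, x ∈ E) → l.foldl (fun st p2 =>
          if p1 == p2 || st.1.contains (p2, p1) then st
          else ((st.1.insert (p1, p2) st.2).insert (p2, p1) st.2, st.2 + 1)) (d, k) = (d, k) := by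
        intro l
        induction l with
        | nil => intro _; rfl
        | cons q l' ihl =>
          intro hl
          rw [List.foldl_cons, if_pos ?_]
          · exact ihl (fun x hx => hl x (List.mem_cons_of_mem _ hx))
          · rw [Bool.or_eq_true, beq_iff_eq]
            by_cases hq : p1 = q
            · exact Or.inl hq
            · exact Or.inr ((hinv q p1 (hl q List.mem_cons_self) hp1E).2
                ⟨fun h => hq h.symm, Or.inr hp1S⟩)
      rw [List.foldl_cons, hfix E (fun x hx => hx)]
      rw [ih S d k (fun x hx => hsub x (List.mem_cons_of_mem _ hx))
        (by rw [hE, pvSift_cons_mem t' hp1S]) hinv]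
      rw [pvSift_cons_mem t' hp1S]
    · -- fresh p1: the inner loop assigns exactly the pairs (p1, q), q ∈ pvSift (p1 :: S) E
      have hcq : ∀ q ∈ E, (d.contains (q, p1) = true ↔ q ∈ S) := by
        intro q hq
        rw [hinv q p1 hq hp1E]
        constructor
        · rintro ⟨hne, hS | hS⟩
          · exact hS
          · exact absurd hS hp1S
        · intro hS
          exact ⟨fun h => hp1S (h ▸ hS), Or.inl hS⟩
      rw [List.foldl_cons, pvInner p1 E S d k hp1S hcq]
      have hsift' : pvSift (p1 :: S) E = pvSift (p1 :: S) t' := by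
        rw [pvSift_cons_avoid, pvSift_cons_avoid, hE, pvSift_cons_not_mem t' hp1S, List.filter_cons]
        simp only [bne_self_eq_false, Bool.false_eq_true, if_false]
        have hall : ∀ a ∈ pvSift (p1 :: S) t', (a != p1) = true := by
          intro a ha
          have := (mem_pvSift a t' (p1 :: S)).1 ha
          simp only [bne_iff_ne, ne_eq]
          intro h; exact this.2 (h ▸ List.mem_cons_self)
        rw [List.filter_eq_self.2 hall, pvSift_cons_avoid]
      rw [pvSift_cons_not_mem t' hp1S, pvPairs, List.foldl_append, ← hsift']
      rcases hX : ((pvSift (p1 :: S) E).map (fun q => (p1, q))).foldl pvInsertBoth (d, k) with ⟨d1, k1⟩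
      have hinv1 : ∀ x y, x ∈ E → y ∈ E →
          (d1.contains (x, y) = true ↔ x ≠ y ∧ (x ∈ p1 :: S ∨ y ∈ p1 :: S)) := by
        intro x y hx hy
        have hchar := contains_pvFold ((pvSift (p1 :: S) E).map (fun q => (p1, q))) d k (x, y)
        rw [hX] at hchar
        rw [show ((d1, k1) : PySem.Dict (String × String) Int × Int).1 = d1 from rfl] at hchar
        rw [hchar]
        simp only [List.mem_map, mem_pvSift, List.mem_cons]
        constructor
        · rintro (h | ⟨pr, ⟨q, ⟨hqE, hqA⟩, rfl⟩, hkey⟩)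
          · have := (hinv x y hx hy).1 h
            exact ⟨this.1, this.2.elim (fun hh => Or.inl (Or.inr hh)) (fun hh => Or.inr (Or.inr hh))⟩
          · have hq1 : ¬(q = p1) := fun hh => hqA (by simp [hh])
            have hqS : q ∉ S := fun hh => hqA (by simp [hh])
            rcases hkey with ⟨rfl, rfl⟩ | ⟨rfl, rfl⟩
            · exact ⟨fun hh => hq1 hh.symm, Or.inl (Or.inl rfl)⟩
            · exact ⟨hq1, Or.inr (Or.inl rfl)⟩
        · rintro ⟨hxy, hor⟩
          by_cases hxS : x ∈ S
          · exact Or.inl ((hinv x y hx hy).2 ⟨hxy, Or.inl hxS⟩)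
          · by_cases hyS : y ∈ S
            · exact Or.inl ((hinv x y hx hy).2 ⟨hxy, Or.inr hyS⟩)
            · rcases hor with (rfl | hxS') | (rfl | hyS')
              · refine Or.inr ⟨(x, y), ⟨y, ⟨hy, fun hin => ?_⟩, rfl⟩, Or.inl rfl⟩
                rcases hin with h | h
                · exact hxy h.symm
                · exact hyS h
              · exact absurd hxS' hxS
              · refine Or.inr ⟨(y, x), ⟨x, ⟨hx, fun hin => ?_⟩, rfl⟩, Or.inr rfl⟩
                rcases hin with h | h
                · exact hxy h
                · exact hxS h
              · exact absurd hyS' hyS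
      rw [ih (p1 :: S) d1 k1 (fun x hx => hsub x (List.mem_cons_of_mem _ hx)) hsift' hinv1,
        ← hsift']

theorem pvEnumFold : ∀ (ps : List (String × String)) (d : PySem.Dict (String × String) Int) (k : Int),
    (PySem.List.enumerate ps k).foldl (fun d ip => (d.insert ip.2 ip.1).insert (ip.2.2, ip.2.1) ip.1) d
      = (ps.foldl pvInsertBoth (d, k)).1 := by
  intro ps
  induction ps with
  | nil => intro d k; rfl
  | cons pr rest ih =>
    intro d k
    rw [PySem.List.enumerate_cons, List.foldl_cons, List.foldl_cons]
    exact ih ((d.insert pr k).insert (pr.2, pr.1) k) (k + 1)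

theorem pvFoldl_flatMap_pairs {γ : Type} (f : γ → String × String → γ) (l1 l2 : List String) :
    ∀ (init : γ), (l1.flatMap (fun a => l2.map (fun b => (a, b)))).foldl f init
      = l1.foldl (fun acc a => l2.foldl (fun acc b => f acc (a, b)) acc) init := by
  induction l1 with
  | nil => intro init; rfl
  | cons x xs ih =>
    intro init
    rw [List.flatMap_cons, List.foldl_append, List.foldl_map, List.foldl_cons, ih]

-- ===== VERDICT (by name: the statement is the Claim_ definition above) =====
theorem get_sbpl_locs_dic_spec : Claim_equal_get_sbpl_locs_dic := by
  intro names cosmo offset sd _ _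
  unfold Spec_get_sbpl_locs_dic
  cases sd
  · -- non-diagonal branch
    simp only [get_sbpl_locs_dic, get_sbpl_locs_dic_alt, Bool.false_eq_true, if_false]
    rw [pvEnumFold, pvDedup_eq_pvSift]
    have := pvOuter names names [] PySem.Dict.empty 1 (fun x hx => hx) rfl
      (by intro x y _ _; simp [pysem])
    exact congrArg (fun d : PySem.Dict (String × String) Int =>
      d.items.map (fun kv => (kv.1.1, kv.1.2, kv.2))) (congrArg Prod.fst this)
  · -- diagonal branch
    simp only [get_sbpl_locs_dic, get_sbpl_locs_dic_alt, if_true]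
    rw [pvFoldl_flatMap_pairs]
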